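-- pv_equiv track=rewrite | github.com/rukalogic/leetcode | 2836-neither-minimum-nor-maximum/neither-minimum-nor-maximum.py | findNonMinOrMax
-- ===== SOURCE A (Python) =====
-- from typing import List
--
-- def findNonMinOrMax(nums: List[int]) -> int:
--     for i in range(len(nums)):
--         if i == 0:
--             minm = nums[i]
--         minm = min(minm, nums[i])
--     for i in range(len(nums)):
--         if i == 0:
--             maxi = nums[i]
--         maxi = max(maxi, nums[i])
--     for num in nums:
--         if num != maxi and num != minm:
--             return num
--     return -1
-- ===== SOURCE B (Python) =====
-- def findNonMinOrMax(nums):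
--     if not nums:
--         return -1
--     s = sorted(nums)
--     lo, hi = s[0], s[-1]
--     for num in nums:
--         if num != lo and num != hi:
--             return num
--     return -1
-- ===== Notes on version B (the rewrite author's own statement) =====
-- stated objective: alternative
-- what changed: Replaces A's two index-based running min/max loops (with the i==0 accumulator-reset trick) by a single sort, reading min and max as the first and last elements of the sorted copy, with an explicit empty-list guard; the first-match scan over the original order is kept.
import Mathlib
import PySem

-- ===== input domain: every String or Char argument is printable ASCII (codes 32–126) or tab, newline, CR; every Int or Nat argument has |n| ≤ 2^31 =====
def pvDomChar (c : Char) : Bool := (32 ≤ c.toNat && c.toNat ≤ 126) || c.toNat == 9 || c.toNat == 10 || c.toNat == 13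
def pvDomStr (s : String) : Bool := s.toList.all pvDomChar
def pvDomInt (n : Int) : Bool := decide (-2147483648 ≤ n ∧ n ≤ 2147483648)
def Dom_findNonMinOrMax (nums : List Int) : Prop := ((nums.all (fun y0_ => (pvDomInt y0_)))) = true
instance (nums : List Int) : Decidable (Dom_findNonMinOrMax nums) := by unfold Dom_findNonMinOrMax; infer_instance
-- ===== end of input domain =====

-- B replaces A's two index-looped running min/max scans with sort-then-pick (min and max read from the first and last elements of the sorted copy) plus an explicit empty-list guard; objective: alternative structure.

-- ===== PORT A =====
-- A's third loop: return the first num with num != maxi and num != minm, else -1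
def pvScanA (maxi minm : Int) : List Int → Int
  | [] => -1
  | x :: xs => if x ≠ maxi ∧ x ≠ minm then x else pvScanA maxi minm xs

def findNonMinOrMax (nums : List Int) : Int :=
  let minm := (PySem.List.pyRange 0 (PySem.List.len nums) 1).foldl
      (fun m i => min (if i = 0 then PySem.List.pyGetD nums i 0 else m)
                      (PySem.List.pyGetD nums i 0)) 0
  let maxi := (PySem.List.pyRange 0 (PySem.List.len nums) 1).foldl
      (fun m i => max (if i = 0 then PySem.List.pyGetD nums i 0 else m)
                      (PySem.List.pyGetD nums i 0)) 0
  pvScanA maxi minm nums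

-- ===== PORT B =====
-- B's scan: first num with num != lo and num != hi, else -1
def pvScanB (lo hi : Int) : List Int → Int
  | [] => -1
  | x :: xs => if x ≠ lo ∧ x ≠ hi then x else pvScanB lo hi xs

def findNonMinOrMax_alt (nums : List Int) : Int :=
  match nums with
  | [] => -1
  | _ :: _ =>
    let s := PySem.List.sorted nums (fun v => v) false
    let lo := PySem.List.pyGetD s 0 0
    let hi := PySem.List.pyGetD s (-1) 0
    pvScanB lo hi nums

-- ===== PRECONDITION & SPEC =====
def Spec_findNonMinOrMax (nums : List Int) (out : Int) : Prop := out = findNonMinOrMax_alt nums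
instance (nums : List Int) (out : Int) : Decidable (Spec_findNonMinOrMax nums out) := by unfold Spec_findNonMinOrMax; infer_instance

-- ===== CLAIM (what is proved, stated in full; the proofs are below) =====
def Claim_equal_findNonMinOrMax : Prop := ∀ (nums : List Int), Dom_findNonMinOrMax nums → Spec_findNonMinOrMax nums (findNonMinOrMax nums)

-- ===== LEMMAS AND PROOFS =====

-- the two scans agree (the conjunction is written in the opposite order)
theorem pvScanA_eq_scanB (a b : Int) (l : List Int) : pvScanA a b l = pvScanB b a l := by
  induction l with
  | nil => rfl
  | cons x xs ih =>
    simp only [pvScanA, pvScanB, ih]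
    by_cases h1 : x = a <;> by_cases h2 : x = b <;> simp [h1, h2]

-- A's "i == 0 resets the accumulator" min loop over indices is the running min started at the head
theorem pvAMin_eq (x : Int) (xs : List Int) :
    (PySem.List.pyRange 0 (PySem.List.len (x :: xs)) 1).foldl
      (fun m i => min (if i = 0 then PySem.List.pyGetD (x :: xs) i 0 else m)
                      (PySem.List.pyGetD (x :: xs) i 0)) 0 = xs.foldl min x := by
  have h0 : (0:Int) < PySem.List.len (x :: xs) := by simp [PySem.List.len]
  rw [PySem.List.pyRange_one_cons h0]
  have hget0 : PySem.List.pyGetD (x :: xs) 0 0 = x := by simp [pysem]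
  simp only [List.foldl_cons]
  norm_num [hget0]
  have hc := PySem.List.foldl_congr_mem
      (l := PySem.List.pyRange 1 (PySem.List.len (x :: xs)) 1)
      (f := fun m i => min (if i = 0 then PySem.List.pyGetD (x :: xs) i 0 else m)
                      (PySem.List.pyGetD (x :: xs) i 0))
      (g := fun m i => min m (PySem.List.pyGetD (x :: xs) i 0))
      (init := x)
      (by intro acc i hi
          have := (PySem.List.mem_pyRange_one).1 hi
          simp only [if_neg (by omega : ¬ i = 0)])
  simp only [PySem.List.len_eq, List.length_cons, Nat.cast_add, Nat.cast_one] at hc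
  rw [hc]
  have hf := PySem.List.foldl_pyRange_pyGetD' (x :: xs) 0 (fun m v => min m v) x (a := 1) (by norm_num)
  simp only [List.length_cons, Nat.cast_add, Nat.cast_one] at hf
  rw [hf]
  simp

-- same for the max loop
theorem pvAMax_eq (x : Int) (xs : List Int) :
    (PySem.List.pyRange 0 (PySem.List.len (x :: xs)) 1).foldl
      (fun m i => max (if i = 0 then PySem.List.pyGetD (x :: xs) i 0 else m)
                      (PySem.List.pyGetD (x :: xs) i 0)) 0 = xs.foldl max x := by
  have h0 : (0:Int) < PySem.List.len (x :: xs) := by simp [PySem.List.len]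
  rw [PySem.List.pyRange_one_cons h0]
  have hget0 : PySem.List.pyGetD (x :: xs) 0 0 = x := by simp [pysem]
  simp only [List.foldl_cons]
  norm_num [hget0]
  have hc := PySem.List.foldl_congr_mem
      (l := PySem.List.pyRange 1 (PySem.List.len (x :: xs)) 1)
      (f := fun m i => max (if i = 0 then PySem.List.pyGetD (x :: xs) i 0 else m)
                      (PySem.List.pyGetD (x :: xs) i 0))
      (g := fun m i => max m (PySem.List.pyGetD (x :: xs) i 0))
      (init := x)
      (by intro acc i hi
          have := (PySem.List.mem_pyRange_one).1 hi
          simp only [if_neg (by omega : ¬ i = 0)])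
  simp only [PySem.List.len_eq, List.length_cons, Nat.cast_add, Nat.cast_one] at hc
  rw [hc]
  have hf := PySem.List.foldl_pyRange_pyGetD' (x :: xs) 0 (fun m v => max m v) x (a := 1) (by norm_num)
  simp only [List.length_cons, Nat.cast_add, Nat.cast_one] at hf
  rw [hf]
  simp

-- sorted(nums)[0] is the running min of nums
theorem pvSortedHead_eq_min (x : Int) (xs : List Int) :
    PySem.List.pyGetD (PySem.List.sorted (x :: xs) (fun v => v) false) 0 0 = xs.foldl min x := by
  obtain ⟨m, t, hs⟩ : ∃ m t, PySem.List.sorted (x :: xs) (fun v => v) false = m :: t := by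
    cases h : PySem.List.sorted (x :: xs) (fun v => v) false with
    | nil => exact absurd ((PySem.List.sorted_eq_nil_iff _ _ _).1 h) (by simp)
    | cons a b => exact ⟨a, b, rfl⟩
  rw [hs]
  have hget : PySem.List.pyGetD (m :: t) 0 0 = m := by simp [pysem]
  rw [hget]
  have hmle : ∀ y ∈ (x :: xs), m ≤ y := PySem.List.key_head_sorted_le (x :: xs) (fun v => v) hs
  have hmem : m ∈ (x :: xs) := by
    have : m ∈ PySem.List.sorted (x :: xs) (fun v => v) false := by rw [hs]; simp
    exact (PySem.List.mem_sorted _ _ _ _).1 this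
  have hfle := PySem.List.foldl_min_le xs x
  have hfmem := PySem.List.foldl_min_mem xs x
  apply le_antisymm
  · rcases hfmem with h | h
    · rw [h]; exact hmle x (by simp)
    · exact hmle _ (by simp [h])
  · rcases List.mem_cons.1 hmem with h | h
    · rw [h]; exact hfle.1
    · exact hfle.2 m h

-- sorted(nums)[-1] is the running max of nums
theorem pvSortedLast_eq_max (x : Int) (xs : List Int) :
    PySem.List.pyGetD (PySem.List.sorted (x :: xs) (fun v => v) false) (-1) 0 = xs.foldl max x := by
  obtain ⟨m, t, hs⟩ : ∃ m t, PySem.List.sorted (x :: xs) (fun v => v) false = m :: t := by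
    cases h : PySem.List.sorted (x :: xs) (fun v => v) false with
    | nil => exact absurd ((PySem.List.sorted_eq_nil_iff _ _ _).1 h) (by simp)
    | cons a b => exact ⟨a, b, rfl⟩
  rw [hs]
  have hget : PySem.List.pyGetD (m :: t) (-1) 0 = (m :: t).getLast (by simp) := by
    simp [PySem.List.pyGetD, PySem.List.pyGet?, PySem.List.pyIdx?, List.getLast_eq_getElem]
    rfl
  rw [hget]
  set g := (m :: t).getLast (by simp) with hg
  have hgmem : g ∈ (x :: xs) := by
    have : g ∈ (m :: t) := List.getLast_mem _
    rw [← hs] at this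
    exact (PySem.List.mem_sorted _ _ _ _).1 this
  have hge : ∀ y ∈ (x :: xs), y ≤ g := by
    intro y hy
    have hy' : y ∈ PySem.List.sorted (x :: xs) (fun v => v) false :=
      (PySem.List.mem_sorted _ _ _ _).2 hy
    obtain ⟨p, hp, hyp⟩ := List.getElem_of_mem hy'
    have hlen : (PySem.List.sorted (x :: xs) (fun v => v) false).length = t.length + 1 := by
      rw [hs]; simp
    have hmono := PySem.List.key_sorted_getElem_mono (xs := x :: xs) (key := fun v => v)
      (p := p) (q := (PySem.List.sorted (x :: xs) (fun v => v) false).length - 1)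
      (by omega) (by omega)
    have hlast : (PySem.List.sorted (x :: xs) (fun v => v) false)[(PySem.List.sorted (x :: xs) (fun v => v) false).length - 1]'(by omega) = g := by
      rw [hg, List.getLast_eq_getElem]
      congr 1 <;> rw [hs]
    rw [hyp, hlast] at hmono
    exact hmono
  have hfle := PySem.List.le_foldl_max xs x
  have hfmem := PySem.List.foldl_max_mem xs x
  apply le_antisymm
  · rcases List.mem_cons.1 hgmem with h | h
    · rw [h]; exact hfle.1
    · exact hfle.2 g h
  · rcases hfmem with h | h
    · rw [h]; exact hge x (by simp)
    · exact hge _ (by simp [h])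

-- ===== VERDICT (by name: the statement is the Claim_ definition above) =====
theorem findNonMinOrMax_spec : Claim_equal_findNonMinOrMax := by
  intro nums _
  unfold Spec_findNonMinOrMax
  cases nums with
  | nil => rfl
  | cons x xs =>
    show findNonMinOrMax (x :: xs) = findNonMinOrMax_alt (x :: xs)
    unfold findNonMinOrMax findNonMinOrMax_alt
    simp only [pvAMin_eq, pvAMax_eq, pvSortedHead_eq_min, pvSortedLast_eq_max]
    exact pvScanA_eq_scanB _ _ _
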